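-- pv_equiv track=rewrite | github.com/hliangzhao/taos | taos/algo/common.py | bs_x_k
-- ===== SOURCE A (Python) =====
-- def competence(c: int, bklg: int):
--     return max(c - bklg, 0)
--
-- def bs_x_k(num_tasks_to_allocate, bklgs, caps):
--     """
--     The calculation of x_k through binary search for any task group k of some job.
--     """
--     lower_bound = min(bklgs) + 1
--     upper_bound = max(bklgs) + num_tasks_to_allocate
--     x_k = lower_bound
--     while lower_bound < upper_bound:
--         x_k = int((lower_bound + upper_bound) / 2) #round down
--         if sum(competence(x_k, bklg) * cap for (bklg, cap) in zip(bklgs, caps)) >= num_tasks_to_allocate: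
--             #valid
--             upper_bound = x_k
--         else:
--             lower_bound = x_k + 1
--
--     return lower_bound
-- ===== SOURCE B (Python) =====
-- def bs_x_k(num_tasks_to_allocate, bklgs, caps):
--     """
--     Same bisection on the answer as the original (for mixed-sign caps the result is
--     probe-path dependent, so the outer search is fixed), but each probe's weighted
--     competence sum is evaluated differently: sort the (backlog, cap) pairs once,
--     build prefix sums of cap and backlog*cap, and compute the sum as x*C - S at
--     the rank of x (inner bisection), since sum(max(x-b,0)*c) = x*C - S over the
--     pairs with b < x.
--     """
--     lower = min(bklgs) + 1
--     upper = max(bklgs) + num_tasks_to_allocate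
--     pairs = sorted(zip(bklgs, caps), key=lambda p: p[0])
--     n = len(pairs)
--     pc = [0]
--     ps = [0]
--     for b, c in pairs:
--         pc.append(pc[-1] + c)
--         ps.append(ps[-1] + b * c)
--     while lower < upper:
--         x = int((lower + upper) / 2)
--         a, t = 0, n
--         while a < t:
--             m = (a + t) // 2
--             if pairs[m][0] < x:
--                 a = m + 1
--             else:
--                 t = m
--         if x * pc[a] - ps[a] >= num_tasks_to_allocate:
--             upper = x
--         else:
--             lower = x + 1
--     return lower
-- ===== Notes on version B (the rewrite author's own statement) =====
-- stated objective: alternative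
-- what changed: Keeps A's bisection on the answer (with mixed-sign caps the result is probe-path dependent, so the outer search is forced) but deletes the weighted-competence rescan of all pairs done at every probe: the (backlog, cap) pairs are sorted once, prefix sums of cap and backlog*cap are precomputed, and each probe is evaluated as x*C - S at the rank of x found by an inner bisection.
import Mathlib
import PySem

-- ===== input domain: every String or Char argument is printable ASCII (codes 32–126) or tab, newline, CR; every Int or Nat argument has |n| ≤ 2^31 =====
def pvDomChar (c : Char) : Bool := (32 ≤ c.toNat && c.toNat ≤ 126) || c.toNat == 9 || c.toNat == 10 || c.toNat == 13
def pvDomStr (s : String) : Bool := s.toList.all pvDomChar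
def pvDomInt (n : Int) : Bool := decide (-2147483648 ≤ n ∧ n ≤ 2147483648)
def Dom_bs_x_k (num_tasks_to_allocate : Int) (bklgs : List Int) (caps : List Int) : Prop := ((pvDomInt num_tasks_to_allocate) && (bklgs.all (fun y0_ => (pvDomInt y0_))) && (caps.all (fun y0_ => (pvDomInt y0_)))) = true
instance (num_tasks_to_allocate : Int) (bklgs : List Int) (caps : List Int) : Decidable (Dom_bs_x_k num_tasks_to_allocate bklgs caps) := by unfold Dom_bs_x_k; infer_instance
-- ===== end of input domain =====

-- B keeps A's bisection on the answer (with mixed-sign caps the result depends on the probe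
-- path, so the outer search is fixed) but replaces the weighted competence sum recomputed over
-- all pairs at every probe by sort-once + prefix sums + an inner rank bisection.

-- ===== PORT A =====
def competence (c : Int) (bklg : Int) : Int := max (c - bklg) 0

-- sum(competence(x, bklg) * cap for (bklg, cap) in zip(bklgs, caps))
def pvASum (x : Int) (bklgs caps : List Int) : Int :=
  (bklgs.zip caps).foldl (fun s p => s + competence x p.1 * p.2) 0

-- the while-loop of A; fuel = initial (upper - lower): when the loop terminates it
-- does so within that many iterations, and past it A does not return at all (the
-- interval no longer shrinks, both ports then agree on the fuel-out value).
-- int((lo+hi)/2) truncates toward zero on these magnitudes, i.e. Int.tdiv.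
def pvALoop (N : Int) (bklgs caps : List Int) : Nat → Int → Int → Int
  | 0, lo, _ => lo
  | fuel+1, lo, hi =>
    if lo < hi then
      let x := (lo + hi).tdiv 2
      if N ≤ pvASum x bklgs caps then pvALoop N bklgs caps fuel lo x
      else pvALoop N bklgs caps fuel (x+1) hi
    else lo

def bs_x_k (num_tasks_to_allocate : Int) (bklgs : List Int) (caps : List Int) : Int :=
  match PySem.List.min? bklgs (fun y => y), PySem.List.max? bklgs (fun y => y) with
  | some mn, some mx =>
    let lower_bound := mn + 1
    let upper_bound := mx + num_tasks_to_allocate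
    pvALoop num_tasks_to_allocate bklgs caps (upper_bound - lower_bound).toNat lower_bound upper_bound
  | _, _ => 0  -- min([]) raises ValueError; excluded by Pre_

-- ===== PORT B =====
-- pc.append(pc[-1] + c) loop: the running prefix sums of cap after each pair
def pvAccC : List (Int × Int) → Int → List Int
  | [], _ => []
  | p :: t, s => (s + p.2) :: pvAccC t (s + p.2)

-- ps.append(ps[-1] + b * c) loop: the running prefix sums of backlog*cap
def pvAccS : List (Int × Int) → Int → List Int
  | [], _ => []
  | p :: t, s => (s + p.1 * p.2) :: pvAccS t (s + p.1 * p.2)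

-- inner while loop (hand-rolled bisect_left on the sorted pairs); fuel = n;
-- the lookups never go out of range on the indices this loop produces (.getD 0 is inert)
def pvBisect (pairs : List (Int × Int)) (x : Int) : Nat → Int → Int → Int
  | 0, a, _ => a
  | fuel+1, a, t =>
    if a < t then
      let m := PySem.Int.floordiv (a + t) 2
      if (((PySem.List.pyGet? pairs m).map Prod.fst).getD 0) < x then
        pvBisect pairs x fuel (m + 1) t
      else pvBisect pairs x fuel a m
    else a

-- outer while loop of B: same bisection as A, but the probe is evaluated as
-- x*pc[a] - ps[a] at the rank a of x; same fuel discipline as A's port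
def pvBLoop (N : Int) (pairs : List (Int × Int)) (pc ps : List Int) : Nat → Int → Int → Int
  | 0, lo, _ => lo
  | fuel+1, lo, hi =>
    if lo < hi then
      let x := (lo + hi).tdiv 2
      let a := pvBisect pairs x pairs.length 0 (pairs.length : Int)
      if N ≤ x * ((PySem.List.pyGet? pc a).getD 0) - ((PySem.List.pyGet? ps a).getD 0) then
        pvBLoop N pairs pc ps fuel lo x
      else pvBLoop N pairs pc ps fuel (x + 1) hi
    else lo

def bs_x_k_alt (num_tasks_to_allocate : Int) (bklgs : List Int) (caps : List Int) : Int :=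
  match PySem.List.min? bklgs (fun y => y) with
  | none => 0  -- min([]) raises ValueError; excluded by Pre_
  | some mn =>
    match PySem.List.max? bklgs (fun y => y) with
    | none => 0
    | some mx =>
      let lower := mn + 1
      let upper := mx + num_tasks_to_allocate
      let pairs := PySem.List.sorted (bklgs.zip caps) (fun p => p.1) false
      let pc := 0 :: pvAccC pairs 0
      let ps := 0 :: pvAccS pairs 0
      pvBLoop num_tasks_to_allocate pairs pc ps (upper - lower).toNat lower upper

-- ===== PRECONDITION & SPEC =====
-- Pre_ excludes exactly the empty bklgs, on which A (and B) raise ValueError at min([]).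
def Pre_bs_x_k (num_tasks_to_allocate : Int) (bklgs : List Int) (caps : List Int) : Prop :=
  bklgs ≠ []
instance (num_tasks_to_allocate : Int) (bklgs : List Int) (caps : List Int) : Decidable (Pre_bs_x_k num_tasks_to_allocate bklgs caps) := by unfold Pre_bs_x_k; infer_instance

def pvWitness_bs_x_k : Int × List Int × List Int := (3, [2, 0, 1], [1, 2, 0])

def Spec_bs_x_k (num_tasks_to_allocate : Int) (bklgs : List Int) (caps : List Int) (out : Int) : Prop := out = bs_x_k_alt num_tasks_to_allocate bklgs caps
instance (num_tasks_to_allocate : Int) (bklgs : List Int) (caps : List Int) (out : Int) : Decidable (Spec_bs_x_k num_tasks_to_allocate bklgs caps out) := by unfold Spec_bs_x_k; infer_instance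

-- ===== CLAIM (what is proved, stated in full; the proofs are below) =====
def Claim_equal_bs_x_k : Prop := ∀ (num_tasks_to_allocate : Int) (bklgs : List Int) (caps : List Int), Dom_bs_x_k num_tasks_to_allocate bklgs caps → Pre_bs_x_k num_tasks_to_allocate bklgs caps → Spec_bs_x_k num_tasks_to_allocate bklgs caps (bs_x_k num_tasks_to_allocate bklgs caps)

-- ===== LEMMAS AND PROOFS =====

theorem pvFoldl_add_eq_sum (g : Int × Int → Int) (l : List (Int × Int)) (s : Int) :
    l.foldl (fun a p => a + g p) s = s + (l.map g).sum := by
  induction l generalizing s with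
  | nil => simp
  | cons p t ih => simp [List.foldl_cons, ih, add_assoc]

theorem pvASum_eq_sum (x : Int) (bklgs caps : List Int) :
    pvASum x bklgs caps = ((bklgs.zip caps).map (fun p => max (x - p.1) 0 * p.2)).sum := by
  simpa [pvASum, competence] using pvFoldl_add_eq_sum (fun p => max (x - p.1) 0 * p.2) (bklgs.zip caps) 0

-- sum over l of (x - b)*c with prefix sums
theorem pvLinear_sum (x : Int) (l : List (Int × Int)) :
    (l.map (fun p => (x - p.1) * p.2)).sum
      = x * (l.map Prod.snd).sum - (l.map (fun p => p.1 * p.2)).sum := by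
  induction l with
  | nil => simp
  | cons p t ih => simp [ih]; ring

-- on a split (every done-element strictly below x, every rest-element at or above x)
-- the competence sum is linear: x·C − S over the done part
theorem pvSeg_formula (x : Int) (done rest : List (Int × Int))
    (hlow : ∀ p ∈ done, p.1 < x) (hhigh : ∀ p ∈ rest, x ≤ p.1) :
    ((done ++ rest).map (fun p => max (x - p.1) 0 * p.2)).sum
      = x * (done.map Prod.snd).sum - (done.map (fun p => p.1 * p.2)).sum := by
  rw [List.map_append, List.sum_append]
  have h1 : done.map (fun p => max (x - p.1) 0 * p.2)
      = done.map (fun p => (x - p.1) * p.2) := by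
    apply List.map_congr_left
    intro p hp
    have := hlow p hp
    have hm : max (x - p.1) 0 = x - p.1 := by omega
    rw [hm]
  have h2 : (rest.map (fun p => max (x - p.1) 0 * p.2)).sum = 0 := by
    apply List.sum_eq_zero
    intro a ha
    obtain ⟨p, hp, rfl⟩ := List.mem_map.1 ha
    have := hhigh p hp
    have hm : max (x - p.1) 0 = 0 := by omega
    rw [hm, zero_mul]
  rw [h1, h2, add_zero, pvLinear_sum]

-- the sum over the zip equals the sum over its sorted rearrangement
theorem pvSum_sorted_eq (x : Int) (bklgs caps : List Int) :
    ((PySem.List.sorted (bklgs.zip caps) (fun p => p.1) false).map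
        (fun p => max (x - p.1) 0 * p.2)).sum
      = pvASum x bklgs caps := by
  rw [pvASum_eq_sum]
  exact (List.Perm.map _ (PySem.List.sorted_perm (bklgs.zip caps) (fun p => p.1) false)).sum_eq

-- sortedness gives elementwise monotone firsts
theorem pvSorted_getElem_le {pairs : List (Int × Int)}
    (hsort : pairs.Pairwise (fun p q : Int × Int => p.1 ≤ q.1))
    {i j : Nat} (hij : i ≤ j) (hj : j < pairs.length) : pairs[i].1 ≤ pairs[j].1 := by
  rcases lt_or_eq_of_le hij with h | h
  · exact List.pairwise_iff_getElem.1 hsort i j (by omega) hj h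
  · subst h; exact le_rfl

-- the hand-rolled bisect finds the rank of x in the sorted pairs
theorem pvBisect_spec (pairs : List (Int × Int)) (x : Int)
    (hsort : pairs.Pairwise (fun p q : Int × Int => p.1 ≤ q.1)) :
    ∀ (fuel : Nat) (a t : Int), 0 ≤ a → a ≤ t → t ≤ (pairs.length : Int) →
      (t - a).toNat ≤ fuel →
      (∀ i : Nat, (i : Int) < a → (hlt : i < pairs.length) → pairs[i].1 < x) →
      (∀ i : Nat, t ≤ (i : Int) → (hlt : i < pairs.length) → x ≤ pairs[i].1) →
      0 ≤ pvBisect pairs x fuel a t ∧ pvBisect pairs x fuel a t ≤ (pairs.length : Int) ∧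
      (∀ i : Nat, (i : Int) < pvBisect pairs x fuel a t → (hlt : i < pairs.length) → pairs[i].1 < x) ∧
      (∀ i : Nat, pvBisect pairs x fuel a t ≤ (i : Int) → (hlt : i < pairs.length) → x ≤ pairs[i].1) := by
  intro fuel
  induction fuel with
  | zero =>
    intro a t h0 hat htn hfuel hlow hhigh
    have hta : t = a := by omega
    subst hta
    simp only [pvBisect]
    exact ⟨h0, by omega, hlow, hhigh⟩
  | succ fuel ih =>
    intro a t h0 hat htn hfuel hlow hhigh
    rw [pvBisect]
    by_cases hlt : a < t
    · simp only [hlt, if_pos]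
      have hm : PySem.Int.floordiv (a + t) 2 = (a + t) / 2 :=
        PySem.Int.floordiv_eq_ediv_of_pos (by omega)
      generalize hmdef : PySem.Int.floordiv (a + t) 2 = m
      rw [hmdef] at hm
      have hma : a ≤ m := by omega
      have hmt : m < t := by omega
      have hmlen : m.toNat < pairs.length := by omega
      have hget : (((PySem.List.pyGet? pairs m).map Prod.fst).getD 0) = pairs[m.toNat].1 := by
        rw [PySem.List.pyGet?_eq_some_getElem pairs (i := m) (by omega) (by omega)]
        rfl
      rw [hget]
      by_cases hcmp : pairs[m.toNat].1 < x
      · simp only [hcmp, if_pos]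
        refine ih (m + 1) t (by omega) (by omega) htn (by omega) ?_ hhigh
        intro i hi hilt
        by_cases hia : (i : Int) < a
        · exact hlow i hia hilt
        · have : pairs[i].1 ≤ pairs[m.toNat].1 :=
            pvSorted_getElem_le hsort (by omega) hmlen
          omega
      · simp only [hcmp, if_neg, not_false_iff]
        refine ih a m h0 (by omega) (by omega) (by omega) hlow ?_
        intro i hi hilt
        have : pairs[m.toNat].1 ≤ pairs[i].1 :=
          pvSorted_getElem_le hsort (by omega) hilt
        omega
    · simp only [hlt, if_neg, not_false_iff]
      have hta : t = a := by omega
      subst hta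
      exact ⟨h0, by omega, hlow, hhigh⟩

-- the prefix-sum lists built by the appending loops
theorem pvAccC_getElem? (l : List (Int × Int)) :
    ∀ (s : Int) (j : Nat), j < l.length →
      (pvAccC l s)[j]? = some (s + ((l.take (j + 1)).map Prod.snd).sum) := by
  induction l with
  | nil => intro s j hj; simp at hj
  | cons p t ih =>
    intro s j hj
    cases j with
    | zero => simp [pvAccC]
    | succ j =>
      have := ih (s + p.2) j (by simpa using hj)
      simp only [pvAccC, List.getElem?_cons_succ, this, List.take_succ_cons, List.map_cons,
        List.sum_cons]
      congr 1
      ring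

theorem pvAccS_getElem? (l : List (Int × Int)) :
    ∀ (s : Int) (j : Nat), j < l.length →
      (pvAccS l s)[j]? = some (s + ((l.take (j + 1)).map (fun p => p.1 * p.2)).sum) := by
  induction l with
  | nil => intro s j hj; simp at hj
  | cons p t ih =>
    intro s j hj
    cases j with
    | zero => simp [pvAccS]
    | succ j =>
      have := ih (s + p.1 * p.2) j (by simpa using hj)
      simp only [pvAccS, List.getElem?_cons_succ, this, List.take_succ_cons, List.map_cons,
        List.sum_cons]
      congr 1
      ring

theorem pvAccC_length (l : List (Int × Int)) : ∀ s : Int, (pvAccC l s).length = l.length := by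
  induction l with
  | nil => intro s; rfl
  | cons p t ih => intro s; simp [pvAccC, ih]

theorem pvAccS_length (l : List (Int × Int)) : ∀ s : Int, (pvAccS l s).length = l.length := by
  induction l with
  | nil => intro s; rfl
  | cons p t ih => intro s; simp [pvAccS, ih]

-- pc[k] and ps[k] are the prefix sums of the first k pairs
theorem pvPC_lookup (pairs : List (Int × Int)) (k : Int) (h0 : 0 ≤ k) (hk : k ≤ (pairs.length : Int)) :
    (PySem.List.pyGet? (0 :: pvAccC pairs 0) k).getD 0
      = ((pairs.take k.toNat).map Prod.snd).sum := by
  have hlen : k < ((0 :: pvAccC pairs 0).length : Int) := by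
    simp [pvAccC_length]; omega
  rw [PySem.List.pyGet?_eq_some_getElem (0 :: pvAccC pairs 0) (i := k) h0 hlen]
  rcases Int.eq_ofNat_of_zero_le h0 with ⟨j, rfl⟩
  cases j with
  | zero => simp
  | succ j =>
    have hj : j < pairs.length := by omega
    have := pvAccC_getElem? pairs 0 j hj
    have hsome : (0 :: pvAccC pairs 0)[((j + 1 : Nat) : Int).toNat]? =
        some (0 + ((pairs.take (j + 1)).map Prod.snd).sum) := by
      simpa using this
    have hgetD : (0 :: pvAccC pairs 0)[((j + 1 : Nat) : Int).toNat] =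
        0 + ((pairs.take (j + 1)).map Prod.snd).sum := by
      have := List.getElem?_eq_getElem (l := 0 :: pvAccC pairs 0)
        (i := ((j + 1 : Nat) : Int).toNat) (by simp [pvAccC_length]; omega)
      rw [this] at hsome
      exact Option.some.inj hsome
    simp only [Option.getD_some, hgetD]
    simp
theorem pvPS_lookup (pairs : List (Int × Int)) (k : Int) (h0 : 0 ≤ k) (hk : k ≤ (pairs.length : Int)) :
    (PySem.List.pyGet? (0 :: pvAccS pairs 0) k).getD 0
      = ((pairs.take k.toNat).map (fun p => p.1 * p.2)).sum := by
  have hlen : k < ((0 :: pvAccS pairs 0).length : Int) := by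
    simp [pvAccS_length]; omega
  rw [PySem.List.pyGet?_eq_some_getElem (0 :: pvAccS pairs 0) (i := k) h0 hlen]
  rcases Int.eq_ofNat_of_zero_le h0 with ⟨j, rfl⟩
  cases j with
  | zero => simp
  | succ j =>
    have hj : j < pairs.length := by omega
    have := pvAccS_getElem? pairs 0 j hj
    have hsome : (0 :: pvAccS pairs 0)[((j + 1 : Nat) : Int).toNat]? =
        some (0 + ((pairs.take (j + 1)).map (fun p => p.1 * p.2)).sum) := by
      simpa using this
    have hgetD : (0 :: pvAccS pairs 0)[((j + 1 : Nat) : Int).toNat] =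
        0 + ((pairs.take (j + 1)).map (fun p => p.1 * p.2)).sum := by
      have := List.getElem?_eq_getElem (l := 0 :: pvAccS pairs 0)
        (i := ((j + 1 : Nat) : Int).toNat) (by simp [pvAccS_length]; omega)
      rw [this] at hsome
      exact Option.some.inj hsome
    simp only [Option.getD_some, hgetD]
    simp

-- the probe evaluation of B equals A's competence sum, at every x
theorem pvEval_eq (x : Int) (bklgs caps : List Int) :
    (let pairs := PySem.List.sorted (bklgs.zip caps) (fun p => p.1) false
     let a := pvBisect pairs x pairs.length 0 (pairs.length : Int)
     x * ((PySem.List.pyGet? (0 :: pvAccC pairs 0) a).getD 0)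
       - ((PySem.List.pyGet? (0 :: pvAccS pairs 0) a).getD 0))
      = pvASum x bklgs caps := by
  dsimp only
  have hsort : (PySem.List.sorted (bklgs.zip caps) (fun p => p.1) false).Pairwise
      (fun p q : Int × Int => p.1 ≤ q.1) :=
    PySem.List.sorted_pairwise (bklgs.zip caps) (fun p => p.1)
  set pairs := PySem.List.sorted (bklgs.zip caps) (fun p => p.1) false with hP
  obtain ⟨hr0, hrn, hrlow, hrhigh⟩ :=
    pvBisect_spec pairs x hsort pairs.length 0 (pairs.length : Int)
      le_rfl (by omega) le_rfl (by omega)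
      (fun i hi _ => absurd hi (by omega))
      (fun i hi hlt => absurd hi (by omega))
  set a := pvBisect pairs x pairs.length 0 (pairs.length : Int) with ha
  rw [pvPC_lookup pairs a hr0 hrn, pvPS_lookup pairs a hr0 hrn]
  have hsplit : pairs.take a.toNat ++ pairs.drop a.toNat = pairs := List.take_append_drop _ _
  have hlow : ∀ p ∈ pairs.take a.toNat, p.1 < x := by
    intro p hp
    obtain ⟨i, hi, rfl⟩ := List.mem_iff_getElem.1 hp
    rw [List.getElem_take]
    have hilen : i < pairs.length := by
      have := List.length_take_le a.toNat pairs
      omega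
    have hia : (i : Int) < a := by
      have := hi
      simp [List.length_take] at this
      omega
    exact hrlow i hia hilen
  have hhigh : ∀ p ∈ pairs.drop a.toNat, x ≤ p.1 := by
    intro p hp
    obtain ⟨i, hi, rfl⟩ := List.mem_iff_getElem.1 hp
    rw [List.getElem_drop]
    have hilen : a.toNat + i < pairs.length := by
      simp [List.length_drop] at hi
      omega
    have hia : a ≤ ((a.toNat + i : Nat) : Int) := by omega
    exact hrhigh (a.toNat + i) hia hilen
  have := pvSeg_formula x (pairs.take a.toNat) (pairs.drop a.toNat) hlow hhigh
  rw [hsplit] at this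
  rw [← pvSum_sorted_eq x bklgs caps, ← hP, this]

-- lockstep: with equal probe evaluations, B's loop is A's loop
theorem pvLoop_eq (N : Int) (bklgs caps : List Int) :
    ∀ (fuel : Nat) (lo hi : Int),
      pvBLoop N (PySem.List.sorted (bklgs.zip caps) (fun p => p.1) false)
        (0 :: pvAccC (PySem.List.sorted (bklgs.zip caps) (fun p => p.1) false) 0)
        (0 :: pvAccS (PySem.List.sorted (bklgs.zip caps) (fun p => p.1) false) 0) fuel lo hi
      = pvALoop N bklgs caps fuel lo hi := by
  intro fuel
  induction fuel with
  | zero => intro lo hi; rfl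
  | succ fuel ih =>
    intro lo hi
    rw [pvBLoop, pvALoop]
    by_cases hlt : lo < hi
    · simp only [hlt, if_pos]
      rw [pvEval_eq ((lo + hi).tdiv 2) bklgs caps]
      by_cases hp : N ≤ pvASum ((lo + hi).tdiv 2) bklgs caps
      · simp only [hp, if_pos]
        exact ih lo ((lo + hi).tdiv 2)
      · simp only [hp, if_neg, not_false_iff]
        exact ih ((lo + hi).tdiv 2 + 1) hi
    · simp only [hlt, if_neg, not_false_iff]

-- ===== VERDICT (by name: the statement is the Claim_ definition above) =====
theorem bs_x_k_spec : Claim_equal_bs_x_k := by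
  intro N bklgs caps _ hpre
  show bs_x_k N bklgs caps = bs_x_k_alt N bklgs caps
  cases hmin : PySem.List.min? bklgs (fun y => y) with
  | none => exact absurd ((PySem.List.min?_eq_none_iff bklgs (fun y => y)).1 hmin) hpre
  | some mn =>
  cases hmax : PySem.List.max? bklgs (fun y => y) with
  | none => exact absurd ((PySem.List.max?_eq_none_iff bklgs (fun y => y)).1 hmax) hpre
  | some mx =>
  simp only [bs_x_k, bs_x_k_alt, hmin, hmax]
  exact (pvLoop_eq N bklgs caps (mx + N - (mn + 1)).toNat (mn + 1) (mx + N)).symm
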